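-- pv_equiv track=rewrite | github.com/Naateri/Compiladores | Labs/2/lab_old.py | analizadorLexico
-- ===== SOURCE A (Python) =====
-- operators = ['+','-','*','/','=']
--
-- def analizadorLexico(linea):
--     tokens = list()
--     cur_token = "" #Variables
--     for letra in linea: #recorrer linea
--         if letra in operators: #token de operacion
--
--             if cur_token != "": #Variable encontrada
--                 tokens.append(cur_token)
--
--             tokens.append(letra) #metiendo token de operacion
--             cur_token = ""
--         else: #variable
--             if letra == " ":
--                 if cur_token != "":
--                     tokens.append(cur_token)
--                     cur_token = ""
--             else:
--                 cur_token += letra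
--
--     if cur_token != "": #variable al final de la linea
--         tokens.append(cur_token)
--
--     return tokens
-- ===== SOURCE B (Python) =====
-- operators = ['+','-','*','/','=']
--
-- def analizadorLexico(linea):
--     # Surround each operator with spaces, then split on the space character:
--     # the split does the flushing the original's cur_token state machine did.
--     expanded = "".join(" " + ch + " " if ch in operators else ch for ch in linea)
--     return [t for t in expanded.split(" ") if t]
-- ===== Notes on version B (the rewrite author's own statement) =====
-- stated objective: idiomatic
-- what changed: Replaces the character-by-character state machine (cur_token accumulate-and-flush) with a pad-operators-with-spaces pass followed by a split on the space character and a filter of empty pieces.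
import Mathlib
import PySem

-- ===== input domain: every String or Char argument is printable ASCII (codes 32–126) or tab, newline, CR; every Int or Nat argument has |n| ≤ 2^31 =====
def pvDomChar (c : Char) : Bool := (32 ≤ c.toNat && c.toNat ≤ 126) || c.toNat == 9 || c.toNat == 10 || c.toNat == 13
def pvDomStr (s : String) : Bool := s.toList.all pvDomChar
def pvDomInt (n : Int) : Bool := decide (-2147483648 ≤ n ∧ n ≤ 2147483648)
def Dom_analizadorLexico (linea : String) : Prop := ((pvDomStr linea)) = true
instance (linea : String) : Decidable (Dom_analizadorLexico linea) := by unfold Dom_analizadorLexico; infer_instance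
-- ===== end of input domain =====

-- B replaces A's cur_token state machine by padding operators with spaces and splitting
-- on the literal space; same cost, no accumulator state (objective: idiomatic).

-- ===== PORT A =====
-- A's loop over the line: state = (tokens so far, cur_token); branches in A's order.
def aLoop : List Char → List (List Char) → List Char → List (List Char)
  | [], tokens, cur => tokens ++ (if cur ≠ [] then [cur] else [])
  | c :: rest, tokens, cur =>
    if c ∈ ['+', '-', '*', '/', '='] then
      aLoop rest ((tokens ++ (if cur ≠ [] then [cur] else [])) ++ [[c]]) []
    else
      if c = ' ' then
        aLoop rest (if cur ≠ [] then tokens ++ [cur] else tokens) []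
      else
        aLoop rest tokens (cur ++ [c])

def analizadorLexico (linea : String) : List String :=
  (aLoop linea.toList [] []).map String.ofList

-- ===== PORT B =====
-- Python's split on a single-character separator keeps empty pieces and maps the empty
-- string to a singleton empty piece — exactly List.splitOn of that character on the char list.
def analizadorLexico_alt (linea : String) : List String :=
  let expanded := linea.toList.flatMap
    (fun c => if c ∈ ['+', '-', '*', '/', '='] then [' ', c, ' '] else [c])
  ((expanded.splitOn ' ').map String.ofList).filter (· ≠ "")

-- ===== PRECONDITION & SPEC =====
def Spec_analizadorLexico (linea : String) (out : List String) : Prop := out = analizadorLexico_alt linea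
instance (linea : String) (out : List String) : Decidable (Spec_analizadorLexico linea out) := by unfold Spec_analizadorLexico; infer_instance

-- ===== CLAIM (what is proved, stated in full; the proofs are below) =====
def Claim_equal_analizadorLexico : Prop := ∀ (linea : String), Dom_analizadorLexico linea → Spec_analizadorLexico linea (analizadorLexico linea)

-- ===== LEMMAS AND PROOFS =====

def pvExpand (c : Char) : List Char :=
  if c ∈ ['+', '-', '*', '/', '='] then [' ', c, ' '] else [c]

theorem pv_splitOn_single {cur : List Char} (hcur : ∀ x ∈ cur, x ≠ ' ') :
    cur.splitOn ' ' = [cur] := by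
  simpa [List.splitOn] using
    List.splitOnP_eq_single (· == ' ') cur (by simpa using hcur)

theorem pv_splitOn_sep {cur rest : List Char} (hcur : ∀ x ∈ cur, x ≠ ' ') :
    (cur ++ ' ' :: rest).splitOn ' ' = cur :: rest.splitOn ' ' := by
  simpa [List.splitOn] using
    List.splitOnP_first (· == ' ') cur (by simpa using hcur) ' ' (by simp) rest

theorem aLoop_eq (l : List Char) (tokens : List (List Char)) (cur : List Char)
    (hcur : ∀ x ∈ cur, x ≠ ' ') :
    aLoop l tokens cur =
      tokens ++ (((cur ++ l.flatMap pvExpand).splitOn ' ').filter (· ≠ [])) := by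
  induction l generalizing tokens cur with
  | nil =>
    simp [aLoop, pv_splitOn_single hcur, List.filter]
    split_ifs with h <;> simp [h]
  | cons c rest ih =>
    by_cases hop : c ∈ ['+', '-', '*', '/', '=']
    · have hc : c ≠ ' ' := by
        intro h; subst h; simp at hop
      rw [show aLoop (c :: rest) tokens cur
            = aLoop rest ((tokens ++ (if cur ≠ [] then [cur] else [])) ++ [[c]]) []
          from by simp [aLoop, hop]]
      rw [ih _ [] (by simp)]
      have h1 : (cur ++ (c :: rest).flatMap pvExpand).splitOn ' '
          = cur :: [c] :: (rest.flatMap pvExpand).splitOn ' ' := by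
        have : cur ++ (c :: rest).flatMap pvExpand
            = cur ++ ' ' :: ([c] ++ ' ' :: rest.flatMap pvExpand) := by
          simp [pvExpand, hop]
        rw [this, pv_splitOn_sep hcur,
            pv_splitOn_sep (by simpa using hc)]
      rw [h1]
      by_cases hne : cur = [] <;> simp [hne, List.filter]
    · by_cases hsp : c = ' '
      · subst hsp
        rw [show aLoop (' ' :: rest) tokens cur
              = aLoop rest (if cur ≠ [] then tokens ++ [cur] else tokens) []
            from by simp [aLoop, hop]]
        rw [ih _ [] (by simp)]
        have h1 : (cur ++ (' ' :: rest).flatMap pvExpand).splitOn ' '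
            = cur :: (rest.flatMap pvExpand).splitOn ' ' := by
          have : cur ++ (' ' :: rest).flatMap pvExpand
              = cur ++ ' ' :: rest.flatMap pvExpand := by
            simp [pvExpand, hop]
          rw [this, pv_splitOn_sep hcur]
        rw [h1]
        by_cases hne : cur = [] <;> simp [hne, List.filter]
      · rw [show aLoop (c :: rest) tokens cur = aLoop rest tokens (cur ++ [c])
            from by simp [aLoop, hop, hsp]]
        rw [ih _ (cur ++ [c]) (by
          intro x hx
          rcases List.mem_append.1 hx with h | h
          · exact hcur x h
          · simp at h; simpa [h] using hsp)]
        have : (cur ++ [c]) ++ rest.flatMap pvExpand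
            = cur ++ (c :: rest).flatMap pvExpand := by
          simp [pvExpand, hop]
        rw [this]

-- ===== VERDICT (by name: the statement is the Claim_ definition above) =====
theorem analizadorLexico_spec : Claim_equal_analizadorLexico := by
  intro linea _
  unfold Spec_analizadorLexico analizadorLexico analizadorLexico_alt
  rw [aLoop_eq linea.toList [] [] (by simp)]
  have hp : ((fun s => decide (s ≠ "")) ∘ String.ofList)
      = (fun l : List Char => decide (l ≠ [])) := by
    funext l
    show decide (String.ofList l ≠ "") = decide (l ≠ [])
    rw [decide_eq_decide]
    simp [← String.toList_inj]
  simp only [List.nil_append, List.filter_map, hp]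
  rfl
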